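-- pv_equiv track=rewrite | github.com/andy1li/codejam | 2019/Round 1A/C. Alien Rhyme /2019-1a-c.py | solve
-- ===== SOURCE A (Python) =====
-- def unpaired(trie):
--     if not trie['nodes']: return 1
--
--     r = sum(map(unpaired, trie['nodes'].values()))
--     if 'end' in trie: r += 1
--     if r >= 2: r -= 2
--     return r
--
-- def solve(words):
--     trie = {'nodes': {}}
--     for word in words:
--         t = trie
--         for letter in reversed(word):
--             if letter not in t['nodes']: t['nodes'][letter] = {'nodes': {}}
--             t =  t['nodes'][letter]
--         t['end'] = True
--
--     return len(words) - sum(map(unpaired, trie['nodes'].values()))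
-- ===== SOURCE B (Python) =====
-- # Alternative implementation: no explicit trie object; deduplicate the reversed
-- # words once, then recursively partition the flat list of suffixes by first
-- # character (one small dict per level), pairing off at most one pair per branch
-- # point exactly like the trie recursion.
--
-- def groups(strs):
--     # strs: list of nonempty strings; bucket by first char (first-occurrence
--     # order), keeping the tails.  Returns the buckets.
--     d = {}
--     for s in strs:
--         d.setdefault(s[0], []).append(s[1:])
--     return list(d.values())
--
-- def unm(strs):
--     # strs: distinct suffix strings hanging under one branch; return how many
--     # remain unpaired (at most one pair is matched per branch point).
--     end = 1 if '' in strs else 0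
--     rest = [s for s in strs if s]
--     if not rest:
--         return 1
--     r = end + sum(unm(g) for g in groups(rest))
--     return r - 2 if r >= 2 else r
--
-- def solve(words):
--     seen = set()
--     suff = []
--     for w in words:
--         r = w[::-1]
--         if r and r not in seen:
--             seen.add(r)
--             suff.append(r)
--     return len(words) - sum(unm(g) for g in groups(suff))
-- ===== Notes on version B (the rewrite author's own statement) =====
-- stated objective: alternative
-- what changed: A builds an explicit suffix-trie of nested dicts and recurses over it; B never builds a trie: it deduplicates the reversed words in one pass and recursively partitions the flat suffix list by first character (a fresh one-level bucket dict per call), pairing at each branch point.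
import Mathlib
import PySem

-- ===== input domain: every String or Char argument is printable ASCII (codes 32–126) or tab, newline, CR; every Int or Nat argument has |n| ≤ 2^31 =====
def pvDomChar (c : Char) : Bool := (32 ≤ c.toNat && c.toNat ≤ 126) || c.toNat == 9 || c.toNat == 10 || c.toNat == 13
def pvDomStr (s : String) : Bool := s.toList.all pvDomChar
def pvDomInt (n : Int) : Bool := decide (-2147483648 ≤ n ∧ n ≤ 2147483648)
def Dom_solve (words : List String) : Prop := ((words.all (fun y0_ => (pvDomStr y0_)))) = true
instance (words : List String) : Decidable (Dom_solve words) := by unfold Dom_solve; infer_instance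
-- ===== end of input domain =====

-- B replaces A's explicitly built suffix trie by a one-pass dedup of the reversed
-- words followed by a recursive partition of the flat suffix list by first
-- character (objective: alternative — same cost, no trie object).

-- ===== PORT A =====
mutual
inductive Trie : Type
  | mk : TrieMap → Bool → Trie
inductive TrieMap : Type
  | nil : TrieMap
  | cons : Char → Trie → TrieMap → TrieMap
end

-- 't["nodes"].get(letter)' with the implicit fresh node of A's 'if letter not in …'
def getChild : TrieMap → Char → Trie
  | TrieMap.nil, _ => Trie.mk TrieMap.nil false
  | TrieMap.cons c' t rest, c => if c' = c then t else getChild rest c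

-- in-place dict update: overwrite keeps position, new key appends
def setChild : TrieMap → Char → Trie → TrieMap
  | TrieMap.nil, c, v => TrieMap.cons c v TrieMap.nil
  | TrieMap.cons c' t rest, c, v =>
      if c' = c then TrieMap.cons c' v rest else TrieMap.cons c' t (setChild rest c v)

-- the inner 'for letter in reversed(word)' walk of A, one word at a time
def insertT : Trie → List Char → Trie
  | Trie.mk m _, [] => Trie.mk m true
  | Trie.mk m e, c :: cs => Trie.mk (setChild m c (insertT (getChild m c) cs)) e
termination_by _ w => w.length

mutual
def unpaired : Trie → Int
  | Trie.mk TrieMap.nil _ => 1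
  | Trie.mk (TrieMap.cons c0 t0 m0) e =>
      let r := sumU (TrieMap.cons c0 t0 m0) + (if e then 1 else 0)
      if 2 ≤ r then r - 2 else r
def sumU : TrieMap → Int
  | TrieMap.nil => 0
  | TrieMap.cons _ t rest => unpaired t + sumU rest
end

def nodesOf : Trie → TrieMap
  | Trie.mk m _ => m

def solve (words : List String) : Int :=
  let root := words.foldl (fun t w => insertT t w.toList.reverse) (Trie.mk TrieMap.nil false)
  (words.length : Int) - sumU (nodesOf root)

-- ===== PORT B =====
-- d.setdefault(s[0], []).append(s[1:]) over strs, then d.values()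
def groupsB (strs : List (List Char)) : List (List (List Char)) :=
  (strs.foldl (fun d s =>
      match s with
      | [] => d
      | c :: t => d.modify c [] (fun g => g ++ [t])) PySem.Dict.empty).values

def totalLen (l : List (List Char)) : Nat := (l.map List.length).sum

-- Source B's recursive unm; the Nat fuel only makes the recursion structural
def unmB : Nat → List (List Char) → Int
  | 0, _ => 0
  | fuel+1, strs =>
      let e : Int := if [] ∈ strs then 1 else 0
      let rest := strs.filter (fun s => !s.isEmpty)
      if rest.isEmpty then 1
      else
        let r := e + ((groupsB rest).map (unmB fuel)).sum
        if 2 ≤ r then r - 2 else r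

def solve_alt (words : List String) : Int :=
  let st := words.foldl
    (fun (st : PySem.Set (List Char) × List (List Char)) w =>
      let r := w.toList.reverse
      if !r.isEmpty && !(PySem.Set.contains st.1 r) then (PySem.Set.add st.1 r, st.2 ++ [r])
      else st)
    (PySem.Set.empty, [])
  let suff := st.2
  (words.length : Int) - ((groupsB suff).map (unmB (totalLen suff + 1))).sum

-- ===== PRECONDITION & SPEC =====
def Spec_solve (words : List String) (out : Int) : Prop := out = solve_alt words
instance (words : List String) (out : Int) : Decidable (Spec_solve words out) := by unfold Spec_solve; infer_instance

-- ===== CLAIM (what is proved, stated in full; the proofs are below) =====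
def Claim_equal_solve : Prop := ∀ (words : List String), Dom_solve words → Spec_solve words (solve words)

-- ===== LEMMAS AND PROOFS =====

-- tails of the elements of l that start with c
def sel (c : Char) (l : List (List Char)) : List (List Char) :=
  l.filterMap (fun s => match s with | [] => none | d :: t => if d = c then some t else none)

-- first characters in first-occurrence order (= trie child-key order)
def fheads (l : List (List Char)) : List Char := PySem.Set.ofList (l.filterMap List.head?)

def buildM (l : List (List Char)) : Trie := l.foldl insertT (Trie.mk TrieMap.nil false)

def mkMap : List Char → List (List Char) → TrieMap
  | [], _ => TrieMap.nil
  | c :: cs, l => TrieMap.cons c (buildM (sel c l)) (mkMap cs l)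

theorem selF_some (c : Char) (a t : List Char) :
    (match a with | [] => none | d :: t' => if d = c then some t' else none) = some t ↔
      a = c :: t := by
  cases a with
  | nil => simp
  | cons d t' =>
      by_cases h : d = c
      · subst h; simp
      · simp [h, List.cons.injEq]

theorem mem_sel (c : Char) (l : List (List Char)) (t : List Char) :
    t ∈ sel c l ↔ (c :: t) ∈ l := by
  simp only [sel, List.mem_filterMap]
  constructor
  · rintro ⟨a, ha, h⟩
    rw [selF_some] at h; subst h; exact ha
  · intro h; exact ⟨c :: t, h, by simp⟩

theorem sel_cons_nil (c : Char) (l : List (List Char)) : sel c ([] :: l) = sel c l := by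
  simp [sel, List.filterMap_cons]

theorem sel_cons_eq (c : Char) (t : List Char) (l : List (List Char)) :
    sel c ((c :: t) :: l) = t :: sel c l := by
  simp [sel, List.filterMap_cons]

theorem sel_cons_ne (c d : Char) (t : List Char) (l : List (List Char)) (h : d ≠ c) :
    sel c ((d :: t) :: l) = sel c l := by
  simp [sel, List.filterMap_cons, h]

theorem totalLen_cons (s : List Char) (l : List (List Char)) :
    totalLen (s :: l) = s.length + totalLen l := by
  simp [totalLen]

theorem sel_append (c : Char) (l l' : List (List Char)) :
    sel c (l ++ l') = sel c l ++ sel c l' := by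
  simp [sel, List.filterMap_append]

theorem mem_fheads (l : List (List Char)) (c : Char) :
    c ∈ fheads l ↔ ∃ t, (c :: t) ∈ l := by
  simp only [fheads, PySem.Set.mem_ofList, List.mem_filterMap]
  constructor
  · rintro ⟨a, ha, h⟩
    cases a with
    | nil => simp at h
    | cons d t => simp at h; subst h; exact ⟨t, ha⟩
  · rintro ⟨t, ht⟩; exact ⟨c :: t, ht, rfl⟩

theorem nodup_fheads (l : List (List Char)) : (fheads l).Nodup := PySem.Set.nodup_ofList _

theorem sel_eq_nil_of_not_head (c : Char) (l : List (List Char))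
    (h : ∀ t, (c :: t) ∉ l) : sel c l = [] := by
  rcases hs : sel c l with _ | ⟨t, rest⟩
  · rfl
  · exact absurd ((mem_sel c l t).mp (by rw [hs]; exact List.mem_cons_self)) (h t)

theorem totalLen_sel_le (c : Char) (l : List (List Char)) :
    totalLen (sel c l) ≤ totalLen l := by
  induction l with
  | nil => simp [sel, totalLen]
  | cons s l ih =>
      cases s with
      | nil => rw [sel_cons_nil, totalLen_cons]; omega
      | cons d t =>
          by_cases h : d = c
          · subst h
            rw [sel_cons_eq, totalLen_cons, totalLen_cons]
            simp [List.length_cons]; omega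
          · rw [sel_cons_ne c d t l h, totalLen_cons]; omega

theorem totalLen_sel_lt (c : Char) (l : List (List Char)) (t : List Char) (h : (c :: t) ∈ l) :
    totalLen (sel c l) < totalLen l := by
  induction l with
  | nil => simp at h
  | cons s l ih =>
      cases s with
      | nil =>
          have h' : (c :: t) ∈ l := by simpa using h
          have := ih h'
          rw [sel_cons_nil, totalLen_cons]; omega
      | cons d t' =>
          by_cases hd : d = c
          · have := totalLen_sel_le c l
            rw [hd, sel_cons_eq, totalLen_cons, totalLen_cons]
            simp [List.length_cons]; omega
          · have h' : (c :: t) ∈ l := by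
              rcases List.mem_cons.mp h with h | h
              · cases h; exact absurd rfl hd
              · exact h
            have := ih h'
            rw [sel_cons_ne c d t' l hd, totalLen_cons]; omega

theorem sel_nodup (c : Char) (l : List (List Char)) (h : l.Nodup) : (sel c l).Nodup := by
  unfold sel
  refine List.Nodup.filterMap ?_ h
  intro a a' b ha hb
  simp only [Option.mem_def] at ha hb
  rw [selF_some] at ha hb
  rw [ha, hb]

theorem mkMap_congr (cs : List Char) (l l' : List (List Char))
    (h : ∀ c ∈ cs, sel c l = sel c l') : mkMap cs l = mkMap cs l' := by
  induction cs with
  | nil => rfl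
  | cons c cs ih =>
      simp only [mkMap]
      rw [h c List.mem_cons_self, ih (fun c' hc' => h c' (List.mem_cons_of_mem _ hc'))]

theorem fheads_append_nil (l : List (List Char)) : fheads (l ++ [[]]) = fheads l := by
  simp [fheads, List.filterMap_append]

theorem ofList_append_singleton {α : Type} [BEq α] [LawfulBEq α] (xs : List α) (c : α) :
    PySem.Set.ofList (xs ++ [c])
      = if c ∈ PySem.Set.ofList xs then PySem.Set.ofList xs else PySem.Set.ofList xs ++ [c] := by
  rw [PySem.Set.ofList_eq_foldl, List.foldl_append]
  simp only [List.foldl_cons, List.foldl_nil, ← PySem.Set.ofList_eq_foldl]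
  by_cases hc : c ∈ PySem.Set.ofList xs
  · rw [if_pos hc]
    simp only [PySem.Set.add]
    rw [if_pos (by rw [PySem.Set.contains_iff]; exact hc)]
  · rw [if_neg hc]
    simp only [PySem.Set.add]
    rw [if_neg (by rw [PySem.Set.contains_iff]; exact hc)]

theorem fheads_append_cons (l : List (List Char)) (c : Char) (t : List Char) :
    fheads (l ++ [c :: t]) = if c ∈ fheads l then fheads l else fheads l ++ [c] := by
  have : fheads (l ++ [c :: t]) = PySem.Set.ofList (l.filterMap List.head? ++ [c]) := by
    simp [fheads, List.filterMap_append]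
  rw [this, ofList_append_singleton]
  rfl

theorem mkMap_other (cs : List Char) (l : List (List Char)) (c : Char) (t : List Char)
    (h : ∀ c' ∈ cs, c' ≠ c) : mkMap cs (l ++ [c :: t]) = mkMap cs l := by
  apply mkMap_congr
  intro c' hc'
  rw [sel_append]
  rw [sel_cons_ne c' c t [] (fun hh => (h c' hc') hh.symm)]
  simp [sel]

theorem setmk (cs : List Char) (l : List (List Char)) (c : Char) (t : List Char)
    (hnodup : cs.Nodup) (hnot : c ∉ cs → sel c l = []) :
    setChild (mkMap cs l) c (insertT (getChild (mkMap cs l) c) t)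
      = mkMap (if c ∈ cs then cs else cs ++ [c]) (l ++ [c :: t]) := by
  induction cs with
  | nil =>
      have hsel : sel c l = [] := hnot (by simp)
      rw [if_neg (by simp)]
      simp only [mkMap, setChild, getChild, List.nil_append]
      have h1 : sel c (l ++ [c :: t]) = [t] := by
        rw [sel_append, hsel, show ([c :: t] : List (List Char)) = (c :: t) :: [] from rfl,
          sel_cons_eq]
        simp [sel]
      rw [h1]
      simp [buildM]
  | cons c' cs' ih =>
      by_cases hc : c' = c
      · subst hc
        rw [if_pos List.mem_cons_self]
        simp only [mkMap, setChild, getChild, if_pos rfl]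
        have hnotin : c' ∉ cs' := (List.nodup_cons.mp hnodup).1
        have h1 : sel c' (l ++ [c' :: t]) = sel c' l ++ [t] := by
          rw [sel_append, show ([c' :: t] : List (List Char)) = (c' :: t) :: [] from rfl,
            sel_cons_eq]
          simp [sel]
        have h2 : buildM (sel c' l ++ [t]) = insertT (buildM (sel c' l)) t := by
          simp [buildM, List.foldl_append]
        rw [h1, h2, mkMap_other cs' l c' t (fun x hx hxe => hnotin (hxe ▸ hx))]
        simp
      · have hne : ¬ (c' = c) := hc
        have hcne : c ≠ c' := fun h => hne h.symm
        have hnodup' : cs'.Nodup := (List.nodup_cons.mp hnodup).2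
        have hnot' : c ∉ cs' → sel c l = [] := by
          intro h
          apply hnot
          intro hmem
          rcases List.mem_cons.mp hmem with h1 | h1
          · exact hne h1.symm
          · exact h h1
        have hh : sel c' (l ++ [c :: t]) = sel c' l := by
          rw [sel_append, show ([c :: t] : List (List Char)) = (c :: t) :: [] from rfl,
            sel_cons_ne c' c t [] hcne]
          simp [sel]
        by_cases hcc : c ∈ cs'
        · rw [if_pos (List.mem_cons_of_mem _ hcc)]
          simp only [mkMap, setChild, getChild, if_neg hne]
          rw [ih hnodup' hnot', if_pos hcc, hh]
        · rw [if_neg (by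
            intro hmem
            rcases List.mem_cons.mp hmem with h1 | h1
            · exact hne h1.symm
            · exact hcc h1)]
          rw [show (c' :: cs') ++ [c] = c' :: (cs' ++ [c]) from rfl]
          simp only [mkMap, setChild, getChild, if_neg hne]
          rw [ih hnodup' hnot', if_neg hcc, hh]

theorem build_char (l : List (List Char)) :
    buildM l = Trie.mk (mkMap (fheads l) l) (decide ([] ∈ l)) := by
  induction l using List.reverseRecOn with
  | nil => rfl
  | append_singleton l w ih =>
      have hb : buildM (l ++ [w]) = insertT (buildM l) w := by
        simp [buildM, List.foldl_append]
      rw [hb, ih]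
      cases w with
      | nil =>
          simp only [insertT, fheads_append_nil]
          congr 1
          · apply mkMap_congr
            intro c _
            rw [sel_append]
            simp [sel]
          · simp
      | cons c t =>
          simp only [insertT]
          have hnot : c ∉ fheads l → sel c l = [] := fun h =>
            sel_eq_nil_of_not_head c l (fun t' ht' => h ((mem_fheads l c).mpr ⟨t', ht'⟩))
          rw [setmk (fheads l) l c t (nodup_fheads l) hnot, fheads_append_cons]
          have hend : (decide ([] ∈ l ++ [c :: t])) = (decide ([] ∈ l)) := by simp
          rw [hend]

theorem sumU_mkMap (cs : List Char) (l : List (List Char)) :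
    sumU (mkMap cs l) = (cs.map (fun c => unpaired (buildM (sel c l)))).sum := by
  induction cs with
  | nil => simp [mkMap, sumU]
  | cons c cs ih => simp [mkMap, sumU, ih]

-- unpaired depends only on the SET of suffixes inserted
theorem fheads_eq_nil_iff (l : List (List Char)) :
    fheads l = [] ↔ ∀ t, ∀ c : Char, (c :: t) ∉ l := by
  constructor
  · intro h t c hc
    have : c ∈ fheads l := (mem_fheads l c).mpr ⟨t, hc⟩
    rw [h] at this
    simp at this
  · intro h
    rcases hf : fheads l with _ | ⟨c, cs⟩
    · rfl
    · exfalso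
      have : c ∈ fheads l := by rw [hf]; exact List.mem_cons_self
      obtain ⟨t, ht⟩ := (mem_fheads l c).mp this
      exact h t c ht

theorem UP (n : Nat) : ∀ (l₁ l₂ : List (List Char)), totalLen l₁ + totalLen l₂ < n →
    (∀ s, s ∈ l₁ ↔ s ∈ l₂) → unpaired (buildM l₁) = unpaired (buildM l₂) := by
  induction n using Nat.strong_induction_on with
  | _ n ih =>
    intro l₁ l₂ hlen hm
    rw [build_char, build_char]
    have hend : (decide ([] ∈ l₁)) = (decide ([] ∈ l₂)) := by simp [hm []]
    have hh : ∀ c, c ∈ fheads l₁ ↔ c ∈ fheads l₂ := fun c => by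
      rw [mem_fheads, mem_fheads]; exact exists_congr (fun t => hm _)
    have hsum : sumU (mkMap (fheads l₁) l₁) = sumU (mkMap (fheads l₂) l₂) := by
      rw [sumU_mkMap, sumU_mkMap]
      rw [← List.sum_toFinset _ (nodup_fheads l₁), ← List.sum_toFinset _ (nodup_fheads l₂)]
      have hfs : (fheads l₁).toFinset = (fheads l₂).toFinset := by
        apply Finset.ext
        intro c
        simp [List.mem_toFinset, hh c]
      rw [hfs]
      apply Finset.sum_congr rfl
      intro c hc
      have hc2 : c ∈ fheads l₂ := by simpa [List.mem_toFinset] using hc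
      have hc1 : c ∈ fheads l₁ := (hh c).mpr hc2
      obtain ⟨t₁, ht₁⟩ := (mem_fheads _ _).mp hc1
      obtain ⟨t₂, ht₂⟩ := (mem_fheads _ _).mp hc2
      apply ih (totalLen l₁ + totalLen l₂) hlen
      · exact Nat.add_lt_add (totalLen_sel_lt c l₁ t₁ ht₁) (totalLen_sel_lt c l₂ t₂ ht₂)
      · intro s; rw [mem_sel, mem_sel]; exact hm _
    rcases h1 : fheads l₁ with _ | ⟨c₁, cs₁⟩
    · have h2 : fheads l₂ = [] := by
        rw [fheads_eq_nil_iff] at h1 ⊢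
        intro t c hc
        exact h1 t c ((hm _).mpr hc)
      rw [h2]
      simp [mkMap, unpaired]
    · rcases h2 : fheads l₂ with _ | ⟨c₂, cs₂⟩
      · exfalso
        have : c₁ ∈ fheads l₂ := (hh c₁).mp (by rw [h1]; exact List.mem_cons_self)
        rw [h2] at this
        simp at this
      · rw [h1, h2] at hsum
        simp only [mkMap] at hsum
        simp only [mkMap, unpaired]
        rw [hend, hsum]

theorem values_eq_map_getD {κ ν : Type} [BEq κ] [LawfulBEq κ] (d : PySem.Dict κ ν) (v0 : ν)
    (h : d.keys.Nodup) : d.values = d.keys.map (fun k => d.getD k v0) := by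
  simp only [PySem.Dict.values, PySem.Dict.keys, List.map_map]
  apply List.map_congr_left
  intro p hp
  exact (PySem.Dict.getD_of_mem_items d (by simpa using hp) h v0).symm

theorem map_headD_eq_filterMap (strs : List (List Char)) (h : ∀ s ∈ strs, s ≠ []) :
    strs.map (fun s => s.headD default) = strs.filterMap List.head? := by
  induction strs with
  | nil => rfl
  | cons s strs ih =>
      rcases s with _ | ⟨c, t⟩
      · exact absurd rfl (h _ List.mem_cons_self)
      · simp only [List.map_cons, List.filterMap_cons, List.head?_cons, List.headD_cons]
        rw [ih (fun s hs => h s (List.mem_cons_of_mem _ hs))]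

theorem filter_pairs_eq_sel (c : Char) (strs : List (List Char)) (h : ∀ s ∈ strs, s ≠ []) :
    ((strs.map (fun s => ((s.headD default : Char), s.tail))).filter
        (fun p => p.1 == c)).map (fun p => p.2) = sel c strs := by
  induction strs with
  | nil => simp [sel]
  | cons s strs ih =>
      have ih' := ih (fun s hs => h s (List.mem_cons_of_mem _ hs))
      rcases s with _ | ⟨d, t⟩
      · exact absurd rfl (h _ List.mem_cons_self)
      · simp only [List.map_cons, List.filter_cons]
        by_cases hd : d = c
        · subst hd
          simp only [List.headD_cons, beq_self_eq_true, if_pos, List.map_cons]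
          rw [sel_cons_eq, ih']
          rfl
        · have : (((d :: t).headD default : Char) == c) = false := by
            simp [List.headD_cons, hd]
          rw [this]
          simp only [Bool.false_eq_true, if_neg, ite_false]
          rw [sel_cons_ne c d t strs hd, ih']

theorem groupsB_eq (strs : List (List Char)) (h : ∀ s ∈ strs, s ≠ []) :
    groupsB strs = (fheads strs).map (fun c => sel c strs) := by
  unfold groupsB
  have hfold : strs.foldl (fun d s =>
      match s with
      | [] => d
      | c :: t => d.modify c [] (fun g => g ++ [t])) PySem.Dict.empty
      = (strs.map (fun s => ((s.headD default : Char), s.tail))).foldl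
          (fun d p => d.modify p.1 [] (fun g => g ++ [p.2])) PySem.Dict.empty := by
    rw [List.foldl_map]
    apply PySem.List.foldl_congr_mem
    intro acc s hs
    rcases s with _ | ⟨c, t⟩
    · exact absurd rfl (h _ hs)
    · rfl
  rw [hfold]
  have hkeys : ((strs.map (fun s => ((s.headD default : Char), s.tail))).foldl
      (fun d p => d.modify p.1 [] (fun g => g ++ [p.2])) PySem.Dict.empty).keys = fheads strs := by
    rw [PySem.Dict.keys_foldl_modify_key _ Prod.fst ([] : List (List Char))
      (fun _ p => fun g => g ++ [p.2]) PySem.Dict.empty]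
    rw [PySem.Dict.keys_empty, PySem.Set.update_nil_left, List.map_map]
    rw [show (Prod.fst ∘ fun (s : List Char) => ((s.headD default : Char), s.tail))
        = fun (s : List Char) => (s.headD default : Char) from rfl]
    rw [map_headD_eq_filterMap strs h]
    rfl
  have hnodup : ((strs.map (fun s => ((s.headD default : Char), s.tail))).foldl
      (fun d p => d.modify p.1 [] (fun g => g ++ [p.2])) PySem.Dict.empty).keys.Nodup := by
    rw [hkeys]; exact nodup_fheads strs
  rw [values_eq_map_getD _ ([] : List (List Char)) hnodup, hkeys]
  apply List.map_congr_left
  intro c hc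
  rw [PySem.Dict.getD_foldl_modify_append]
  rw [PySem.Dict.getD_empty]
  simpa using filter_pairs_eq_sel c strs h

theorem fheads_filter (l : List (List Char)) :
    fheads (l.filter (fun s => !s.isEmpty)) = fheads l := by
  unfold fheads
  congr 1
  induction l with
  | nil => rfl
  | cons s l ih =>
      rcases s with _ | ⟨c, t⟩
      · simpa [List.filter_cons, List.filterMap_cons] using ih
      · simpa [List.filter_cons, List.filterMap_cons] using ih

theorem sel_filter (c : Char) (l : List (List Char)) :
    sel c (l.filter (fun s => !s.isEmpty)) = sel c l := by
  induction l with
  | nil => rfl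
  | cons s l ih =>
      rcases s with _ | ⟨d, t⟩
      · rw [List.filter_cons]
        simpa [sel_cons_nil] using ih
      · rw [List.filter_cons]
        by_cases hd : d = c
        · subst hd
          simpa [sel_cons_eq] using congrArg (List.cons t) ih
        · simp only [List.isEmpty_cons, Bool.not_false, if_pos]
          rw [sel_cons_ne c d t _ hd, sel_cons_ne c d t _ hd]
          exact ih

theorem unm_eq (fuel : Nat) : ∀ (l : List (List Char)), totalLen l < fuel → l.Nodup →
    unmB fuel l = unpaired (buildM l) := by
  induction fuel with
  | zero => intro l h _; exact absurd h (Nat.not_lt_zero _)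
  | succ fuel ih =>
      intro l hlen hnodup
      simp only [unmB]
      by_cases hr : (l.filter (fun s => !s.isEmpty)).isEmpty
      · rw [if_pos hr]
        rw [build_char]
        have hfh : fheads l = [] := by
          rw [fheads_eq_nil_iff]
          intro t c hc
          have hmem : (c :: t) ∈ l.filter (fun s => !s.isEmpty) :=
            List.mem_filter.mpr ⟨hc, by simp⟩
          rw [List.isEmpty_iff.mp hr] at hmem
          simp at hmem
        rw [hfh]
        simp [mkMap, unpaired]
      · rw [if_neg hr]
        have hmemr : ∀ s ∈ l.filter (fun s => !s.isEmpty), s ≠ [] := by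
          intro s hs
          have := (List.mem_filter.mp hs).2
          simpa using this
        rw [groupsB_eq _ hmemr, fheads_filter, List.map_map]
        have hmap : ((fun c => unmB fuel (sel c (l.filter (fun s => !s.isEmpty)))))
            = (fun c => unmB fuel (sel c l)) := by
          funext c
          rw [sel_filter]
        have hsum : (List.map (unmB fuel ∘ fun c => sel c (l.filter (fun s => !s.isEmpty)))
              (fheads l)).sum
            = (List.map (fun c => unpaired (buildM (sel c l))) (fheads l)).sum := by
          congr 1
          apply List.map_congr_left
          intro c hc
          obtain ⟨t, ht⟩ := (mem_fheads l c).mp hc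
          have hlt : totalLen (sel c l) < fuel :=
            Nat.lt_of_lt_of_le (totalLen_sel_lt c l t ht) (Nat.le_of_lt_succ hlen)
          simp only [Function.comp]
          rw [sel_filter]
          exact ih (sel c l) hlt (sel_nodup c l hnodup)
        rw [build_char]
        rcases hf : fheads l with _ | ⟨c0, cs0⟩
        · exfalso
          obtain ⟨s, hsl, hne⟩ : ∃ x ∈ l, ¬ x = [] := by simpa using hr
          rcases s with _ | ⟨c, t⟩
          · exact hne rfl
          · have : c ∈ fheads l := (mem_fheads l c).mpr ⟨t, hsl⟩
            rw [hf] at this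
            simp at this
        · rw [hf] at hsum
          simp only [mkMap, unpaired]
          have hsU : sumU (TrieMap.cons c0 (buildM (sel c0 l)) (mkMap cs0 l))
              = (List.map (fun c => unpaired (buildM (sel c l))) (c0 :: cs0)).sum := by
            have := sumU_mkMap (c0 :: cs0) l
            simpa [mkMap] using this
          rw [hsU, ← hsum]
          have hee : (if [] ∈ l then (1 : Int) else 0)
              = (if decide ([] ∈ l) = true then (1 : Int) else 0) := by simp
          rw [← hee]
          rw [Int.add_comm]

def stepB (st : PySem.Set (List Char) × List (List Char)) (w : String) :
    PySem.Set (List Char) × List (List Char) :=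
  let r := w.toList.reverse
  if !r.isEmpty && !(PySem.Set.contains st.1 r) then (PySem.Set.add st.1 r, st.2 ++ [r]) else st

theorem suff_inv (ws : List String) :
    ((ws.foldl stepB (PySem.Set.empty, [])).2.Nodup
      ∧ (∀ x, x ∈ (ws.foldl stepB (PySem.Set.empty, [])).2
          ↔ (x ≠ [] ∧ ∃ w ∈ ws, x = w.toList.reverse))
      ∧ (∀ x, x ∈ (ws.foldl stepB (PySem.Set.empty, [])).1
          ↔ x ∈ (ws.foldl stepB (PySem.Set.empty, [])).2)) := by
  induction ws using List.reverseRecOn with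
  | nil =>
      refine ⟨List.nodup_nil, ?_, ?_⟩ <;> simp [PySem.Set.empty]
  | append_singleton ws w ih =>
      obtain ⟨hnd, hmem, hseen⟩ := ih
      rw [List.foldl_append]
      simp only [List.foldl_cons, List.foldl_nil]
      by_cases hcond : (!(w.toList.reverse).isEmpty
          && !(PySem.Set.contains (ws.foldl stepB (PySem.Set.empty, [])).1 w.toList.reverse)) = true
      · have hrne : w.toList.reverse ≠ [] := by
          rcases Bool.and_eq_true_iff.mp hcond with ⟨h1, _⟩
          simpa using h1
        have hnotin1 : w.toList.reverse ∉ (ws.foldl stepB (PySem.Set.empty, [])).1 := by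
          rcases Bool.and_eq_true_iff.mp hcond with ⟨_, h2⟩
          simp only [Bool.not_eq_true'] at h2
          intro hmem1
          rw [(PySem.Set.contains_iff _ _).mpr hmem1] at h2
          simp at h2
        have hnotin2 : w.toList.reverse ∉ (ws.foldl stepB (PySem.Set.empty, [])).2 :=
          fun hx => hnotin1 ((hseen _).mpr hx)
        rw [show stepB (ws.foldl stepB (PySem.Set.empty, [])) w
            = (PySem.Set.add (ws.foldl stepB (PySem.Set.empty, [])).1 w.toList.reverse,
               (ws.foldl stepB (PySem.Set.empty, [])).2 ++ [w.toList.reverse]) from by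
          simp only [stepB]; rw [if_pos hcond]]
        refine ⟨?_, ?_, ?_⟩
        · simp only []
          rw [List.nodup_append]
          refine ⟨hnd, List.nodup_singleton _, ?_⟩
          intro a ha b hb heq
          rw [List.mem_singleton.mp hb] at heq
          exact hnotin2 (heq ▸ ha)
        · intro x
          simp only [List.mem_append, List.mem_singleton, hmem x]
          constructor
          · rintro (⟨hxne, w', hw', hxe⟩ | rfl)
            · exact ⟨hxne, w', Or.inl hw', hxe⟩
            · exact ⟨hrne, w, Or.inr rfl, rfl⟩
          · rintro ⟨hxne, w', hw' | rfl, hxe⟩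
            · exact Or.inl ⟨hxne, w', hw', hxe⟩
            · exact Or.inr hxe

        · intro x
          simp only [List.mem_append, List.mem_singleton]
          rw [PySem.Set.mem_add, hseen x]
      · rw [show stepB (ws.foldl stepB (PySem.Set.empty, [])) w
            = ws.foldl stepB (PySem.Set.empty, []) from by
          simp only [stepB]; rw [if_neg (by simpa using hcond)]]
        have hcases : w.toList.reverse = []
            ∨ w.toList.reverse ∈ (ws.foldl stepB (PySem.Set.empty, [])).1 := by
          by_cases h1 : w.toList.reverse = []
          · exact Or.inl h1
          · right
            by_contra h2
            apply hcond
            rw [Bool.and_eq_true_iff]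
            refine ⟨by simpa using h1, ?_⟩
            simp only [Bool.not_eq_true']
            by_contra hc
            have : PySem.Set.contains (ws.foldl stepB (PySem.Set.empty, [])).1
                w.toList.reverse = true := by
              rcases Bool.eq_false_or_eq_true (PySem.Set.contains
                (ws.foldl stepB (PySem.Set.empty, [])).1 w.toList.reverse) with h | h
              · exact h
              · exact absurd h hc
            exact h2 ((PySem.Set.contains_iff _ _).mp this)
        refine ⟨hnd, ?_, hseen⟩
        intro x
        simp only [List.mem_append, List.mem_singleton, hmem x]
        constructor
        · rintro ⟨hxne, w', hw', hxe⟩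
          exact ⟨hxne, w', Or.inl hw', hxe⟩
        · rintro ⟨hxne, w', hw' | rfl, hxe⟩
          · exact ⟨hxne, w', hw', hxe⟩
          · subst hxe
            rcases hcases with h | h
            · exact absurd h hxne
            · exact (hmem _).mp ((hseen _).mp h)

-- ===== VERDICT (by name: the statement is the Claim_ definition above) =====
theorem solve_spec : Claim_equal_solve := by
  intro words _
  unfold Spec_solve
  obtain ⟨hnd, hmem, _⟩ := suff_inv words
  have hA : solve words = (words.length : Int)
      - sumU (mkMap (fheads (words.map (fun w => w.toList.reverse)))
          (words.map (fun w => w.toList.reverse))) := by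
    have hfold : words.foldl (fun t w => insertT t w.toList.reverse) (Trie.mk TrieMap.nil false)
        = buildM (words.map (fun w => w.toList.reverse)) := by
      rw [buildM, List.foldl_map]
    simp only [solve]
    rw [hfold, build_char]
    rfl
  have hB : solve_alt words = (words.length : Int)
      - ((groupsB (words.foldl stepB (PySem.Set.empty, [])).2).map
          (unmB (totalLen (words.foldl stepB (PySem.Set.empty, [])).2 + 1))).sum := rfl
  rw [hA, hB]
  have hSne : ∀ s ∈ (words.foldl stepB (PySem.Set.empty, [])).2, s ≠ [] :=
    fun s hs => ((hmem s).mp hs).1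
  have hmemLS : ∀ x, x ∈ (words.foldl stepB (PySem.Set.empty, [])).2
      ↔ (x ≠ [] ∧ x ∈ words.map (fun w => w.toList.reverse)) := by
    intro x
    rw [hmem x]
    simp only [List.mem_map]
    constructor
    · rintro ⟨hxne, w', hw', hxe⟩
      exact ⟨hxne, w', hw', hxe.symm⟩
    · rintro ⟨hxne, w', hw', hxe⟩
      exact ⟨hxne, w', hw', hxe.symm⟩
  congr 1
  rw [groupsB_eq _ hSne, List.map_map, sumU_mkMap]
  have hhh : ∀ c, c ∈ fheads (words.foldl stepB (PySem.Set.empty, [])).2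
      ↔ c ∈ fheads (words.map (fun w => w.toList.reverse)) := by
    intro c
    rw [mem_fheads, mem_fheads]
    constructor
    · rintro ⟨t, ht⟩
      exact ⟨t, ((hmemLS _).mp ht).2⟩
    · rintro ⟨t, ht⟩
      exact ⟨t, (hmemLS _).mpr ⟨List.cons_ne_nil _ _, ht⟩⟩
  rw [← List.sum_toFinset _ (nodup_fheads (words.map (fun w => w.toList.reverse))),
    ← List.sum_toFinset _ (nodup_fheads (words.foldl stepB (PySem.Set.empty, [])).2)]
  have hfs : (fheads (words.map (fun w => w.toList.reverse))).toFinset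
      = (fheads (words.foldl stepB (PySem.Set.empty, [])).2).toFinset := by
    apply Finset.ext
    intro c
    simp only [List.mem_toFinset]
    exact (hhh c).symm
  rw [hfs]
  apply Finset.sum_congr rfl
  intro c hc
  have hcS : c ∈ fheads (words.foldl stepB (PySem.Set.empty, [])).2 := by simpa using hc
  have hcL : c ∈ fheads (words.map (fun w => w.toList.reverse)) := (hhh c).mp hcS
  simp only [Function.comp]
  have h1 : unmB (totalLen (words.foldl stepB (PySem.Set.empty, [])).2 + 1)
      (sel c (words.foldl stepB (PySem.Set.empty, [])).2)
      = unpaired (buildM (sel c (words.foldl stepB (PySem.Set.empty, [])).2)) := by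
    apply unm_eq
    · exact Nat.lt_succ_of_le (totalLen_sel_le _ _)
    · exact sel_nodup _ _ hnd
  rw [h1]
  apply UP (totalLen (sel c (words.map (fun w => w.toList.reverse)))
      + totalLen (sel c (words.foldl stepB (PySem.Set.empty, [])).2) + 1)
  · omega
  · intro s
    rw [mem_sel, mem_sel]
    constructor
    · intro hs
      exact (hmemLS _).mpr ⟨List.cons_ne_nil _ _, hs⟩
    · intro hs
      exact ((hmemLS _).mp hs).2
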